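-- pv_equiv track=rewrite | github.com/DanielIsakau/devops_lab | task2.py | sortmin
-- ===== SOURCE A (Python) =====
-- def sortmin(y):
--     y = list(str(y))
--     y.sort()
--     w = y.count("0")
--     for i in range(0, w):
--         y.remove("0")
--     if y[0] != "-":
--         for i in range(0, w):
--             y.insert(1, '0')
--     elif y[0] == "-":
--         for i in range(0, w):
--             y.insert(2, '0')
--     y = int("".join(str(i) for i in y))
--     return int(y)
-- ===== SOURCE B (Python) =====
-- def sortmin(y):
--     neg = y < 0
--     ds = sorted(str(abs(y)))
--     zeros = [c for c in ds if c == '0']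
--     rest = [c for c in ds if c != '0']
--     body = rest[0] + ''.join(zeros) + ''.join(rest[1:])
--     return int('-' + body) if neg else int(body)
-- ===== Notes on version B (the rewrite author's own statement) =====
-- stated objective: simpler
-- what changed: A sorts the chars of str(y) then runs three index-based mutation loops (count '0', repeated remove, repeated insert at index 1 or 2 depending on a '-' head); B handles the sign via abs(y), sorts the digits once, partitions them into zeros and non-zeros, and builds the answer by one concatenation rest[0]+zeros+rest[1:].
-- outside the precondition, e.g. on sortmin(0): A raises IndexError, B raises IndexError
import Mathlib
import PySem

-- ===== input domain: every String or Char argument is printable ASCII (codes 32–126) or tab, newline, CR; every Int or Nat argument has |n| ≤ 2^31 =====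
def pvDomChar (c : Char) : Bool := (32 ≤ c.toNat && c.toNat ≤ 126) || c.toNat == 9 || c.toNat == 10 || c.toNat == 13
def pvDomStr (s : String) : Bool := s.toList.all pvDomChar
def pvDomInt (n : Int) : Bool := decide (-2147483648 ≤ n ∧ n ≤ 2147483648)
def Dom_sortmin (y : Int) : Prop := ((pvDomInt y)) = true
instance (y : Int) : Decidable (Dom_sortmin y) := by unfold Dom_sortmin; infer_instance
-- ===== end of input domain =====

-- B replaces A's count/remove-loop/insert-at-index loops by abs-based sign handling and a
-- single sort-then-partition (zeros vs non-zeros) concatenation; objective: simpler.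

-- ===== PORT A =====
-- literal transliteration of A: sort the chars of str(y), count '0', remove them one by one,
-- reinsert them at index 1 (or 2 after a '-'), join and parse. The `match … | none => 0`
-- and `.getD 0` guards only totalise the IndexError/ValueError points (outside Pre_).
def sortmin (y : Int) : Int :=
  let l0 := PySem.Int.toChars y
  let l1 := PySem.List.sorted l0 (fun c => c) false
  let w := PySem.List.count l1 '0'
  let l2 := (PySem.List.pyRange 0 (w : Int) 1).foldl
      (fun acc _ => (PySem.List.remove? acc '0').getD acc) l1
  let c := PySem.List.pyGetD l2 0 ' '
  let l3 := if c ≠ '-' then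
      (PySem.List.pyRange 0 (w : Int) 1).foldl (fun acc _ => PySem.List.insert acc 1 '0') l2
    else
      (PySem.List.pyRange 0 (w : Int) 1).foldl (fun acc _ => PySem.List.insert acc 2 '0') l2
  (PySem.Int.ofChars? l3).getD 0

-- ===== PORT B =====
-- literal transliteration of B (Source B): sign via abs, sorted digits partitioned into
-- zeros and non-zeros, result = sign + rest[0] + zeros + rest[1:].
def sortmin_alt (y : Int) : Int :=
  let neg := y < 0
  let ds := PySem.List.sorted (PySem.Int.toChars (if y < 0 then -y else y)) (fun c => c) false
  let zeros := ds.filter (fun c => c == '0')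
  let rest := ds.filter (fun c => c != '0')
  let h := PySem.List.pyGetD rest 0 ' '
  let body := [h] ++ zeros ++ PySem.List.slice rest (some 1) none
  if neg then (PySem.Int.ofChars? ('-' :: body)).getD 0
  else (PySem.Int.ofChars? body).getD 0

-- ===== PRECONDITION & SPEC =====
-- Pre_ excludes exactly y = 0: there A raises IndexError (after removing the zeros nothing
-- is left to index), and B raises IndexError on rest[0] as well.
def Pre_sortmin (y : Int) : Prop := y ≠ 0
instance (y : Int) : Decidable (Pre_sortmin y) := by unfold Pre_sortmin; infer_instance
def pvWitness_sortmin : Int := -1020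

def Spec_sortmin (y : Int) (out : Int) : Prop := out = sortmin_alt y
instance (y : Int) (out : Int) : Decidable (Spec_sortmin y out) := by unfold Spec_sortmin; infer_instance

-- ===== CLAIM (what is proved, stated in full; the proofs are below) =====
def Claim_equal_sortmin : Prop := ∀ (y : Int), Dom_sortmin y → Pre_sortmin y → Spec_sortmin y (sortmin y)

-- ===== LEMMAS AND PROOFS =====

-- str(n) for a Nat, as a clean structural recursion (most-significant digit first)
def pvDigs (n : Nat) : List Char :=
  if _h : n < 10 then [Nat.digitChar n]
  else pvDigs (n / 10) ++ [Nat.digitChar (n % 10)]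
decreasing_by exact Nat.div_lt_self (by omega) (by omega)

theorem pvToDigitsCore_eq (fuel n : Nat) (acc : List Char) (h : n < fuel) :
    Nat.toDigitsCore 10 fuel n acc = pvDigs n ++ acc := by
  induction fuel generalizing n acc with
  | zero => omega
  | succ f ih =>
    rw [pvDigs]
    by_cases h10 : n < 10
    · have hz : n / 10 = 0 := by omega
      simp [Nat.toDigitsCore, hz, Nat.mod_eq_of_lt h10, h10]
    · have hnz : n / 10 ≠ 0 := by omega
      simp only [Nat.toDigitsCore, hnz, h10]
      rw [ih (n / 10) _ (by omega)]
      simp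

theorem pvToDigits_eq (n : Nat) : Nat.toDigits 10 n = pvDigs n := by
  have := pvToDigitsCore_eq (n + 1) n [] (by omega)
  simpa [Nat.toDigits] using this

theorem pvDigitChar_range (k : Nat) (hk : k < 10) :
    '0' ≤ Nat.digitChar k ∧ Nat.digitChar k ≤ '9' := by
  interval_cases k <;> decide

theorem pvDigs_mem_range (n : Nat) : ∀ c ∈ pvDigs n, '0' ≤ c ∧ c ≤ '9' := by
  induction n using pvDigs.induct with
  | case1 n h =>
    rw [pvDigs]; simp [h]
    exact pvDigitChar_range n h
  | case2 n h ih =>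
    rw [pvDigs]
    intro c hc
    rw [dif_neg h] at hc
    rcases List.mem_append.mp hc with hc | hc
    · exact ih c hc
    · rw [List.mem_singleton] at hc; subst hc
      exact pvDigitChar_range _ (Nat.mod_lt _ (by omega))

theorem pvDigs_exists_ne_zero (n : Nat) (hn : 0 < n) : ∃ c ∈ pvDigs n, c ≠ '0' := by
  induction n using pvDigs.induct with
  | case1 n h =>
    rw [pvDigs]; simp [h]
    interval_cases n <;> simp_all <;> decide
  | case2 n h ih =>
    rw [pvDigs]
    obtain ⟨c, hc, hne⟩ := ih (by omega)
    exact ⟨c, by simp [h, hc], hne⟩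

-- a fold over a list that ignores the elements is an iterate
theorem pvFoldl_const {α β : Type} (f : α → α) (l : List β) (init : α) :
    l.foldl (fun acc _ => f acc) init = f^[l.length] init := by
  induction l generalizing init with
  | nil => rfl
  | cons x t ih => simp [List.foldl_cons, ih, Function.iterate_succ_apply]

theorem pvFilter_erase_ne (l : List Char) (a : Char) :
    (l.erase a).filter (· != a) = l.filter (· != a) := by
  induction l with
  | nil => simp
  | cons h t ih =>
    by_cases hh : h = a
    · subst hh; simp [List.erase_cons_head]
    · rw [List.erase_cons_tail (by simp [hh])]; simp [hh, ih]

-- removing '0' count-many times = filtering the zeros out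
theorem pvRemove_iterate (w : Nat) (l : List Char) (hw : l.count '0' = w) :
    (fun acc => (PySem.List.remove? acc '0').getD acc)^[w] l = l.filter (· != '0') := by
  induction w generalizing l with
  | zero =>
    have h0 : '0' ∉ l := by simpa using List.count_eq_zero.mp hw
    have : List.filter (fun x => x != '0') l = l := by
      apply List.filter_eq_self.mpr
      intro a ha
      simp only [bne_iff_ne, ne_eq]
      rintro rfl; exact h0 ha
    simp [this]
  | succ n ih =>
    have hmem : '0' ∈ l := List.count_pos_iff.mp (by omega)
    rw [Function.iterate_succ_apply]
    rw [PySem.List.remove?_eq_some_erase l '0' hmem]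
    simp only [Option.getD_some]
    rw [ih (l.erase '0') (by rw [List.count_erase_self]; omega)]
    exact pvFilter_erase_ne l '0'

-- inserting '0' at index 1, n times, into h :: t
theorem pvInsert1_iterate (n : Nat) (h : Char) (t : List Char) :
    (fun acc => PySem.List.insert acc 1 '0')^[n] (h :: t) = h :: List.replicate n '0' ++ t := by
  induction n generalizing t with
  | zero => simp
  | succ k ih =>
    rw [Function.iterate_succ_apply]
    have : PySem.List.insert (h :: t) 1 '0' = h :: '0' :: t := by
      rw [PySem.List.insert_ofNat _ 1 _ (by simp)]; simp
    rw [this, ih ('0' :: t)]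
    simp [List.replicate_succ']

-- inserting '0' at index 2, n times, into a :: b :: t
theorem pvInsert2_iterate (n : Nat) (a b : Char) (t : List Char) :
    (fun acc => PySem.List.insert acc 2 '0')^[n] (a :: b :: t) = a :: b :: List.replicate n '0' ++ t := by
  induction n generalizing t with
  | zero => simp
  | succ k ih =>
    rw [Function.iterate_succ_apply]
    have : PySem.List.insert (a :: b :: t) 2 '0' = a :: b :: '0' :: t := by
      rw [PySem.List.insert_ofNat _ 2 _ (by simp)]; simp
    rw [this, ih ('0' :: t)]
    simp [List.replicate_succ']

-- sorting '-' :: d pulls the '-' to the front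
theorem pvSorted_dash_cons (d : List Char) (hd : ∀ c ∈ d, '0' ≤ c) :
    PySem.List.sorted ('-' :: d) (fun c => c) false = '-' :: PySem.List.sorted d (fun c => c) false := by
  apply PySem.List.sorted_id_eq_of_perm_of_pairwise
  · exact List.Perm.cons '-' (PySem.List.sorted_perm d _ _)
  · refine List.pairwise_cons.mpr ⟨?_, ?_⟩
    · intro c hc
      have := hd c ((PySem.List.mem_sorted d _ _ c).mp hc)
      calc ('-' : Char) ≤ '0' := by decide
        _ ≤ c := this
    · exact PySem.List.sorted_pairwise d (fun c => c)

-- the common core: both ports agree as a function of the digit list of |y|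
theorem pvCore (y : Int) (hy : y ≠ 0) : sortmin y = sortmin_alt y := by
  have hm0 : 0 < y.natAbs := by omega
  have hrange := pvDigs_mem_range y.natAbs
  have hLrange : ∀ c ∈ PySem.List.sorted (pvDigs y.natAbs) (fun c => c) false, '0' ≤ c ∧ c ≤ '9' :=
    fun c hc => hrange c ((PySem.List.mem_sorted _ _ _ c).mp hc)
  obtain ⟨c0, hc0m, hc0ne⟩ := pvDigs_exists_ne_zero y.natAbs hm0
  have hc0L : c0 ∈ PySem.List.sorted (pvDigs y.natAbs) (fun c => c) false :=
    (PySem.List.mem_sorted _ _ _ c0).mpr hc0m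
  have hrest_ne : (PySem.List.sorted (pvDigs y.natAbs) (fun c => c) false).filter (fun x => x != '0') ≠ [] :=
    List.ne_nil_of_mem (List.mem_filter.mpr ⟨hc0L, by simpa using hc0ne⟩)
  obtain ⟨h, t, hht⟩ := List.exists_cons_of_ne_nil hrest_ne
  have hh_mem : h ∈ PySem.List.sorted (pvDigs y.natAbs) (fun c => c) false := by
    have : h ∈ (PySem.List.sorted (pvDigs y.natAbs) (fun c => c) false).filter (fun x => x != '0') := by
      rw [hht]; exact List.mem_cons_self
    exact (List.mem_filter.mp this).1
  have hhge : '0' ≤ h := (hLrange h hh_mem).1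
  have hhne : h ≠ '-' := fun e => by rw [e] at hhge; exact absurd hhge (by decide)
  -- loop shapes, as rewrite rules
  have hremove : ∀ (l : List Char),
      (PySem.List.pyRange 0 ((PySem.List.count l '0' : Nat) : Int) 1).foldl
        (fun acc _ => (PySem.List.remove? acc '0').getD acc) l = l.filter (fun x => x != '0') := by
    intro l
    rw [pvFoldl_const, PySem.List.length_pyRange_one,
        show (((PySem.List.count l '0' : Nat) : Int) - 0).toNat = List.count '0' l by
          rw [PySem.List.count_eq]; omega,
        pvRemove_iterate _ l rfl]
  have hins1 : ∀ (n : Nat) (a : Char) (t : List Char),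
      (PySem.List.pyRange 0 ((n : Nat) : Int) 1).foldl
        (fun acc _ => PySem.List.insert acc 1 '0') (a :: t) = a :: List.replicate n '0' ++ t := by
    intro n a t
    rw [pvFoldl_const, PySem.List.length_pyRange_one,
        show (((n : Nat) : Int) - 0).toNat = n by omega, pvInsert1_iterate]
  have hins2 : ∀ (n : Nat) (a b : Char) (t : List Char),
      (PySem.List.pyRange 0 ((n : Nat) : Int) 1).foldl
        (fun acc _ => PySem.List.insert acc 2 '0') (a :: b :: t) = a :: b :: List.replicate n '0' ++ t := by
    intro n a b t
    rw [pvFoldl_const, PySem.List.length_pyRange_one,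
        show (((n : Nat) : Int) - 0).toNat = n by omega, pvInsert2_iterate]
  rcases lt_or_gt_of_ne hy with hneg | hpos
  · -- y < 0
    have e1 : PySem.Int.toChars y = '-' :: pvDigs y.natAbs := by
      simp [PySem.Int.toChars, hneg, pvToDigits_eq]
    have e2 : PySem.Int.toChars (if y < 0 then -y else y) = pvDigs y.natAbs := by
      rw [if_pos hneg]
      have h1 : ¬ (-y < 0) := by omega
      have h2 : (-y).toNat = y.natAbs := by omega
      simp only [PySem.Int.toChars, if_neg h1, h2, pvToDigits_eq]
    have e3 : PySem.List.sorted ('-' :: pvDigs y.natAbs) (fun c => c) false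
        = '-' :: PySem.List.sorted (pvDigs y.natAbs) (fun c => c) false :=
      pvSorted_dash_cons _ (fun c hc => (hrange c hc).1)
    have e4 : PySem.List.count ('-' :: PySem.List.sorted (pvDigs y.natAbs) (fun c => c) false) '0'
        = PySem.List.count (PySem.List.sorted (pvDigs y.natAbs) (fun c => c) false) '0' := by
      simp [PySem.List.count_eq]
    have e5 : ('-' :: PySem.List.sorted (pvDigs y.natAbs) (fun c => c) false).filter (fun x => x != '0')
        = '-' :: (PySem.List.sorted (pvDigs y.natAbs) (fun c => c) false).filter (fun x => x != '0') := by
      simp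
    simp only [sortmin, sortmin_alt, e1, e2, e3, hremove, e5, hht,
      PySem.List.pyGetD_zero_cons, PySem.List.slice_from_one, List.tail_cons]
    rw [if_neg (by simp), if_pos hneg]
    simp only [hins2, List.filter_beq, e4, PySem.List.count_eq]
    simp
  · -- 0 < y
    have e1 : PySem.Int.toChars y = pvDigs y.natAbs := by
      have h1 : ¬ (y < 0) := by omega
      have h2 : y.toNat = y.natAbs := by omega
      simp [PySem.Int.toChars, h1, h2, pvToDigits_eq]
    have e2 : (if y < 0 then -y else y) = y := if_neg (by omega)
    simp only [sortmin, sortmin_alt, e1, e2, hremove, hht,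
      PySem.List.pyGetD_zero_cons, PySem.List.slice_from_one, List.tail_cons]
    rw [if_pos hhne, if_neg (by omega : ¬ y < 0)]
    simp only [hins1, List.filter_beq, PySem.List.count_eq]
    simp

-- ===== VERDICT (by name: the statement is the Claim_ definition above) =====
theorem sortmin_spec : Claim_equal_sortmin := by
  intro y _ hpre
  unfold Spec_sortmin
  exact pvCore y hpre
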